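-- pv_equiv track=rewrite | github.com/VacseezX/mozi_IKT | mozi.py | szabadHely
-- ===== SOURCE A (Python) =====
-- def szabadHely(lista:list, szam:int):
--     i = 0
--     for sor in lista:
--         szabadHelyek = 0
--         i += 1
--         for ulohely in sor:
--             if ulohely == 0 and ulohely != " ":
--                 szabadHelyek += 1
--             else:
--                 szabadHelyek = 0
--             if szabadHelyek == szam:
--                 return i
-- ===== SOURCE B (Python) =====
-- def szabadHely(lista, szam):
--     if szam < 0:
--         return None
--     for i, sor in enumerate(lista, 1):
--         taken = [-1] + [j for j, x in enumerate(sor) if x != 0] + [len(sor)]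
--         if max(b - a - 1 for a, b in zip(taken, taken[1:])) >= szam:
--             return i
--     return None
-- ===== Notes on version B (the rewrite author's own statement) =====
-- stated objective: alternative
-- what changed: B computes each row's longest free stretch as the largest gap between consecutive occupied-seat positions (sentinels -1 and len(sor)), returning the first 1-based row index whose gap reaches szam (with an early None for a negative request), replacing A's per-seat reset counter tested for exact equality with szam.
-- intended difference: For szam = 0 with a nonempty list whose first row is entirely free, A's leftover-counter artefact skips free rows and returns the index of the first row containing an OCCUPIED seat (or None), while B returns 1, since a request for 0 consecutive free seats is trivially met by the first row; B's reading is the intended one for a free-seat search. — e.g. on szabadHely([[0, 0]], 0): A returns none, B returns some 1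
import Mathlib
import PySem

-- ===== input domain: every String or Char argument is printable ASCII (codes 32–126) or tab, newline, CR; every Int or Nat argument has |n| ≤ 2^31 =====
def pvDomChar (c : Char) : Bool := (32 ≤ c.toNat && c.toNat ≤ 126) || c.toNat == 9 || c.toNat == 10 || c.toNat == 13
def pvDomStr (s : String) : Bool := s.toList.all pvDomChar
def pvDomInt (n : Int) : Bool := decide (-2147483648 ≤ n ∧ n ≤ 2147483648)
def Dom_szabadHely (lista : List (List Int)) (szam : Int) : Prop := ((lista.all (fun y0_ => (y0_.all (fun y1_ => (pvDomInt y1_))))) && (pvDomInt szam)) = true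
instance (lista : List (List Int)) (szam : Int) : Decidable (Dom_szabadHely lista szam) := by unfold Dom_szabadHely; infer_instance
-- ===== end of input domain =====

-- B finds each row's longest free stretch via gaps between occupied-seat positions instead of
-- A's reset counter; on the degenerate szam = 0 corner (D_ below) B returns the intended value.

-- ===== PORT A =====
-- inner for-loop over a row ('ulohely != " "' compares int to str and is always True in Python)
def szabadHelyInner (szam : Int) (sor : List Int) (szabadHelyek : Int) (i : Int) : Option Int :=
  match sor with
  | [] => none
  | ulohely :: rest =>
    let s := if ulohely = 0 then szabadHelyek + 1 else 0
    if s = szam then some i else szabadHelyInner szam rest s i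

-- outer for-loop over the rows, carrying the counter i
def szabadHelyOuter (szam : Int) (lista : List (List Int)) (i : Int) : Option Int :=
  match lista with
  | [] => none
  | sor :: rest =>
    match szabadHelyInner szam sor 0 (i + 1) with
    | some r => some r
    | none => szabadHelyOuter szam rest (i + 1)

def szabadHely (lista : List (List Int)) (szam : Int) : Option Int :=
  szabadHelyOuter szam lista 0

-- ===== PORT B =====
-- taken = [-1] + [j for j, x in enumerate(sor) if x != 0] + [len(sor)];
-- max(b - a - 1 for a, b in zip(taken, taken[1:]))  (the gap list is never empty, so max never
-- sees an empty sequence; .getD 0 is dead)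
def altRowMax (sor : List Int) : Int :=
  let taken : List Int :=
    [-1] ++ ((PySem.List.enumerate sor 0).filter (fun p => p.2 != 0)).map (fun p => p.1)
      ++ [(sor.length : Int)]
  let gaps := (taken.zip taken.tail).map (fun p => p.2 - p.1 - 1)
  (PySem.List.max? gaps (fun y => y)).getD 0

def szabadHelyAltLoop (szam : Int) (lista : List (List Int)) (i : Int) : Option Int :=
  match lista with
  | [] => none
  | sor :: rest =>
    if altRowMax sor ≥ szam then some i else szabadHelyAltLoop szam rest (i + 1)

def szabadHely_alt (lista : List (List Int)) (szam : Int) : Option Int :=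
  if szam < 0 then none else szabadHelyAltLoop szam lista 1

-- ===== PRECONDITION & SPEC =====
-- For szam = 0 with a nonempty list whose first row is entirely free, A's leftover-counter
-- artefact skips free rows and returns the index of the first row with an OCCUPIED seat (or
-- None), while B returns 1: a request for 0 consecutive free seats is trivially met by row 1.
def D_szabadHely (lista : List (List Int)) (szam : Int) : Prop :=
  lista ≠ [] ∧ szam = 0 ∧ ∀ x ∈ lista.headD [], x = 0
instance (lista : List (List Int)) (szam : Int) : Decidable (D_szabadHely lista szam) := by
  unfold D_szabadHely; infer_instance

def Spec_szabadHely (lista : List (List Int)) (szam : Int) (out : Option Int) : Prop :=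
  ¬ D_szabadHely lista szam → out = szabadHely_alt lista szam
instance (lista : List (List Int)) (szam : Int) (out : Option Int) :
    Decidable (Spec_szabadHely lista szam out) := by unfold Spec_szabadHely; infer_instance

def pvDiffWitness_szabadHely : List (List Int) × Int := ([[0, 0]], 0)
def pvDiffWitnessOut_szabadHely : (Option Int) × (Option Int) := (none, some 1)

-- ===== CLAIM (what is proved, stated in full; the proofs are below) =====
def Claim_unchanged_szabadHely : Prop := ∀ (lista : List (List Int)) (szam : Int), Dom_szabadHely lista szam → Spec_szabadHely lista szam (szabadHely lista szam)
def Claim_changed_szabadHely : Prop := Dom_szabadHely (pvDiffWitness_szabadHely.1) (pvDiffWitness_szabadHely.2) ∧ D_szabadHely (pvDiffWitness_szabadHely.1) (pvDiffWitness_szabadHely.2) ∧ szabadHely (pvDiffWitness_szabadHely.1) (pvDiffWitness_szabadHely.2) = pvDiffWitnessOut_szabadHely.1 ∧ szabadHely_alt (pvDiffWitness_szabadHely.1) (pvDiffWitness_szabadHely.2) = pvDiffWitnessOut_szabadHely.2 ∧ pvDiffWitnessOut_szabadHely.1 ≠ pvDiffWitnessOut_szabadHely.2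
def Claim_exact_szabadHely : Prop := ∀ (lista : List (List Int)) (szam : Int), Dom_szabadHely lista szam → D_szabadHely lista szam → szabadHely lista szam ≠ szabadHely_alt lista szam

-- ===== LEMMAS AND PROOFS =====

-- max over A's counter trajectory (value after each seat), starting from counter c
def pvMrun (c : Int) : List Int → Int
  | [] => 0
  | x :: rest => max (if x = 0 then c + 1 else 0) (pvMrun (if x = 0 then c + 1 else 0) rest)

-- gap view, recursively: c = length of the zero-run currently open
def pvGrec (c : Int) : List Int → Int
  | [] => c
  | x :: rest => if x = 0 then pvGrec (c + 1) rest else max c (pvGrec 0 rest)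

-- absolute indices (from k) of the occupied seats
def pvTakenFrom (k : Int) : List Int → List Int
  | [] => []
  | x :: rest => if x = 0 then pvTakenFrom (k + 1) rest else k :: pvTakenFrom (k + 1) rest

-- recursive max over the gaps of (last :: mids ++ [n])
def pvGmax (last : Int) : List Int → Int → Int
  | [], n => n - last - 1
  | t :: ts, n => max (t - last - 1) (pvGmax t ts n)

theorem pvMrun_nonneg (sor : List Int) (c : Int) : 0 ≤ pvMrun c sor := by
  induction sor generalizing c with
  | nil => simp [pvMrun]
  | cons x rest ih => simp only [pvMrun]; exact le_trans (ih _) (le_max_right _ _)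

theorem pvGrec_eq_max (sor : List Int) : ∀ c : Int, 0 ≤ c → pvGrec c sor = max (pvMrun c sor) c := by
  induction sor with
  | nil => intro c hc; simp [pvGrec, pvMrun]; omega
  | cons x rest ih =>
    intro c hc
    by_cases hx : x = 0
    · have h1 := ih (c + 1) (by omega)
      simp only [pvGrec, pvMrun, if_pos hx, h1]
      omega
    · have h1 := ih 0 le_rfl
      have h2 := pvMrun_nonneg rest 0
      simp only [pvGrec, pvMrun, if_neg hx, h1]
      omega

theorem pvInner_pos (szam : Int) (hsz : 1 ≤ szam) (sor : List Int) :
    ∀ c i : Int, 0 ≤ c → c < szam →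
      szabadHelyInner szam sor c i = if szam ≤ pvMrun c sor then some i else none := by
  induction sor with
  | nil => intro c i h0 h1; simp [szabadHelyInner, pvMrun]; omega
  | cons x rest ih =>
    intro c i h0 h1
    by_cases hx : x = 0
    · simp only [szabadHelyInner, pvMrun, if_pos hx]
      have hm := pvMrun_nonneg rest (c + 1)
      by_cases he : c + 1 = szam
      · rw [if_pos he, if_pos (by omega)]
      · rw [if_neg he, ih (c + 1) i (by omega) (by omega)]
        by_cases h3 : szam ≤ pvMrun (c + 1) rest
        · rw [if_pos h3, if_pos (by omega)]
        · rw [if_neg h3, if_neg (by omega)]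
    · simp only [szabadHelyInner, pvMrun, if_neg hx]
      have hm := pvMrun_nonneg rest 0
      rw [if_neg (by omega : ¬ (0 : Int) = szam), ih 0 i le_rfl (by omega)]
      by_cases h3 : szam ≤ pvMrun 0 rest
      · rw [if_pos h3, if_pos (by omega)]
      · rw [if_neg h3, if_neg (by omega)]

theorem pvInner_zero (sor : List Int) :
    ∀ c i : Int, 0 ≤ c →
      szabadHelyInner 0 sor c i = if ∃ x ∈ sor, x ≠ 0 then some i else none := by
  induction sor with
  | nil => intro c i h0; simp [szabadHelyInner]
  | cons x rest ih =>
    intro c i h0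
    simp only [szabadHelyInner]
    by_cases hx : x = 0
    · rw [if_pos hx, if_neg (by omega), ih (c + 1) i (by omega)]
      simp [hx]
    · simp [hx]

theorem pvInner_neg (szam : Int) (hsz : szam < 0) (sor : List Int) :
    ∀ c i : Int, 0 ≤ c → szabadHelyInner szam sor c i = none := by
  induction sor with
  | nil => intro c i h0; simp [szabadHelyInner]
  | cons x rest ih =>
    intro c i h0
    simp only [szabadHelyInner]
    rw [if_neg (by split <;> omega), ih _ i (by split <;> omega)]

theorem pvInner_some (szam : Int) (sor : List Int) :
    ∀ c i r : Int, szabadHelyInner szam sor c i = some r → r = i := by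
  induction sor with
  | nil => intro c i r h; simp [szabadHelyInner] at h
  | cons x rest ih =>
    intro c i r h
    simp only [szabadHelyInner] at h
    by_cases hc : (if x = 0 then c + 1 else 0) = szam
    · rw [if_pos hc] at h; exact (Option.some_inj.mp h).symm
    · rw [if_neg hc] at h; exact ih _ i r h

theorem pvOuter_gt (szam : Int) (lista : List (List Int)) :
    ∀ i r : Int, szabadHelyOuter szam lista i = some r → i < r := by
  induction lista with
  | nil => intro i r h; simp [szabadHelyOuter] at h
  | cons sor rest ih =>
    intro i r h
    simp only [szabadHelyOuter] at h
    cases hm : szabadHelyInner szam sor 0 (i + 1) with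
    | some v =>
      rw [hm] at h
      have hv : v = i + 1 := pvInner_some szam sor 0 (i + 1) v hm
      have h2 : some v = some r := h
      have : v = r := Option.some_inj.mp h2
      omega
    | none =>
      rw [hm] at h
      have h2 : szabadHelyOuter szam rest (i + 1) = some r := h
      have := ih (i + 1) r h2
      omega

-- the gap list of (last :: mids ++ [n])
def pvGapsOf (last : Int) : List Int → Int → List Int
  | [], n => [n - last - 1]
  | t :: ts, n => (t - last - 1) :: pvGapsOf t ts n

theorem pvZip_adj (l : List Int) :
    ∀ last n : Int,
      ((last :: (l ++ [n])).zip (l ++ [n])).map (fun p : Int × Int => p.2 - p.1 - 1)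
        = pvGapsOf last l n := by
  induction l with
  | nil => intro last n; rfl
  | cons t ts ih =>
    intro last n
    simp only [List.cons_append, List.zip_cons_cons, List.map, pvGapsOf]
    rw [← ih t n]

theorem pvFoldGaps (l : List Int) :
    ∀ last n a : Int, (pvGapsOf last l n).foldl max a = max a (pvGmax last l n) := by
  induction l with
  | nil => intro last n a; simp [pvGapsOf, pvGmax]
  | cons t ts ih =>
    intro last n a
    simp only [pvGapsOf, pvGmax, List.foldl, ih]
    omega

theorem pvMaxGaps (l : List Int) (last n : Int) :
    (PySem.List.max? (pvGapsOf last l n) (fun y => y)).getD 0 = pvGmax last l n := by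
  cases l with
  | nil => simp [pvGapsOf, pvGmax, PySem.List.max?_id_cons]
  | cons t ts =>
    simp only [pvGapsOf, PySem.List.max?_id_cons, Option.getD_some, pvGmax]
    rw [pvFoldGaps]

theorem pvTakenFrom_spec (sor : List Int) :
    ∀ k : Int, ((PySem.List.enumerate sor k).filter (fun p => p.2 != 0)).map (fun p => p.1)
      = pvTakenFrom k sor := by
  induction sor with
  | nil => intro k; simp [PySem.List.enumerate_nil, pvTakenFrom]
  | cons x rest ih =>
    intro k
    rw [PySem.List.enumerate_cons]
    by_cases hx : x = 0
    · simp [hx, pvTakenFrom, ih]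
    · simp [hx, pvTakenFrom, ih]

theorem pvGmax_grec (sor : List Int) :
    ∀ last k : Int, last < k →
      pvGmax last (pvTakenFrom k sor) (k + sor.length) = pvGrec (k - last - 1) sor := by
  induction sor with
  | nil => intro last k h; simp [pvTakenFrom, pvGmax, pvGrec]
  | cons x rest ih =>
    intro last k h
    have hlen : (k + ((x :: rest).length : Int)) = (k + 1) + rest.length := by
      simp; ring
    by_cases hx : x = 0
    · have h1 := ih last (k + 1) (by omega)
      have h2 : k + 1 - last - 1 = (k - last - 1) + 1 := by ring
      rw [h2] at h1
      simp only [pvTakenFrom, if_pos hx, pvGrec, hlen, h1]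
    · have h1 := ih k (k + 1) (by omega)
      have h2 : k + 1 - k - 1 = 0 := by ring
      rw [h2] at h1
      simp only [pvTakenFrom, if_neg hx, pvGmax, pvGrec, hlen, h1]

theorem pvAltRowMax_eq (sor : List Int) : altRowMax sor = pvGrec 0 sor := by
  have hb := pvGmax_grec sor (-1) 0 (by omega)
  simp only [zero_add] at hb
  have hb2 : (0 : Int) - (-1) - 1 = 0 := by ring
  rw [hb2] at hb
  simp only [altRowMax, List.cons_append, List.nil_append, pvTakenFrom_spec sor 0, List.tail_cons]
  rw [pvZip_adj (pvTakenFrom 0 sor) (-1) (sor.length : Int)]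
  rw [pvMaxGaps (pvTakenFrom 0 sor) (-1) (sor.length : Int)]
  exact hb

theorem pvAltRowMax_nonneg (sor : List Int) : 0 ≤ altRowMax sor := by
  rw [pvAltRowMax_eq, pvGrec_eq_max sor 0 le_rfl]
  have := pvMrun_nonneg sor 0
  omega

theorem pvLoops_pos (szam : Int) (hsz : 1 ≤ szam) (lista : List (List Int)) :
    ∀ i : Int, szabadHelyOuter szam lista i = szabadHelyAltLoop szam lista (i + 1) := by
  induction lista with
  | nil => intro i; rfl
  | cons sor rest ih =>
    intro i
    simp only [szabadHelyOuter, szabadHelyAltLoop]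
    rw [pvInner_pos szam hsz sor 0 (i + 1) le_rfl (by omega)]
    have hrow : altRowMax sor ≥ szam ↔ szam ≤ pvMrun 0 sor := by
      rw [pvAltRowMax_eq, pvGrec_eq_max sor 0 le_rfl]
      constructor <;> intro h <;> omega
    by_cases hc : szam ≤ pvMrun 0 sor
    · rw [if_pos hc, if_pos (hrow.mpr hc)]
    · rw [if_neg hc, if_neg (fun h => hc (hrow.mp h))]
      have := ih (i + 1)
      rw [this]

theorem pvOuter_neg (szam : Int) (hsz : szam < 0) (lista : List (List Int)) :
    ∀ i : Int, szabadHelyOuter szam lista i = none := by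
  induction lista with
  | nil => intro i; rfl
  | cons sor rest ih =>
    intro i
    simp only [szabadHelyOuter]
    rw [pvInner_neg szam hsz sor 0 (i + 1) le_rfl, ih]

-- ===== VERDICT (by name: the statement is the Claim_ definition above) =====
theorem szabadHely_spec : Claim_unchanged_szabadHely := by
  intro lista szam _ hnd
  show szabadHely lista szam = szabadHely_alt lista szam
  by_cases hneg : szam < 0
  · rw [show szabadHely lista szam = none from pvOuter_neg szam hneg lista 0]
    simp [szabadHely_alt, hneg]
  · cases lista with
    | nil =>
      cases h1 : szam <;> simp [szabadHely, szabadHelyOuter, szabadHely_alt, szabadHelyAltLoop]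
    | cons sor rest =>
      by_cases h1 : 1 ≤ szam
      · have := pvLoops_pos szam h1 (sor :: rest) 0
        simp only [szabadHely, szabadHely_alt, if_neg hneg]
        simpa using this
      · have hsz0 : szam = 0 := by omega
        subst hsz0
        have hzero : ∃ x ∈ sor, x ≠ 0 := by
          by_contra hall
          push_neg at hall
          exact hnd ⟨List.cons_ne_nil _ _, rfl, by simpa using hall⟩
        simp only [szabadHely, szabadHely_alt, if_neg hneg]
        show szabadHelyOuter 0 (sor :: rest) 0 = szabadHelyAltLoop 0 (sor :: rest) 1
        simp only [szabadHelyOuter, szabadHelyAltLoop]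
        rw [pvInner_zero sor 0 (0 + 1) le_rfl, if_pos hzero,
          if_pos (pvAltRowMax_nonneg sor)]
        norm_num

theorem szabadHely_changed : Claim_changed_szabadHely := by
  unfold Claim_changed_szabadHely; decide

theorem szabadHely_tight : Claim_exact_szabadHely := by
  intro lista szam _ hd
  obtain ⟨hne, h0, hall⟩ := hd
  subst h0
  cases lista with
  | nil => exact absurd rfl hne
  | cons sor rest =>
    have hB : szabadHely_alt (sor :: rest) 0 = some 1 := by
      simp [szabadHely_alt, szabadHelyAltLoop, pvAltRowMax_nonneg sor]
    rw [hB]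
    simp only [List.headD_cons] at hall
    show szabadHelyOuter 0 (sor :: rest) 0 ≠ some 1
    simp only [szabadHelyOuter]
    rw [pvInner_zero sor 0 (0 + 1) le_rfl,
      if_neg (by push_neg; intro x hx; exact hall x hx)]
    cases hm : szabadHelyOuter 0 rest (0 + 1) with
    | none => simp
    | some r =>
      have := pvOuter_gt 0 rest (0 + 1) r hm
      simp only [ne_eq, Option.some_inj]
      omega
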